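-- pv_equiv track=rewrite | github.com/ChrisRoyse/Cortesia | vectors/final_error_validation.py | extract_test_code
-- ===== SOURCE A (Python) =====
-- def extract_test_code(test_case: str) -> str:
--     """
--     Extract the actual test code from an error test case string
--
--     Args:
--         test_case: The test case string from ErrorInstance
--
--     Returns:
--         Extracted Python code or empty string if extraction fails
--     """
--     lines = test_case.strip().split('\n')
--     code_lines = []
--     in_code_block = False
--
--     for line in lines:
--         # Skip comment lines and empty lines at the start
--         if not in_code_block:
--             if line.strip().startswith('#') or not line.strip():
--                 continue
--             if line.strip().startswith('def ') or line.strip().startswith('class '):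
--                 in_code_block = True
--             elif 'def ' in line or 'class ' in line:
--                 in_code_block = True
--
--         if in_code_block:
--             # Stop at expected/actual comments
--             if '# Expected:' in line or '# Actual:' in line:
--                 break
--             code_lines.append(line)
--
--     return '\n'.join(code_lines).strip()
-- ===== SOURCE B (Python) =====
-- def extract_test_code(test_case: str) -> str:
--     """Index-finding re-implementation: locate the first code line, then the
--     first terminator line after it, and return the joined slice."""
--     lines = test_case.strip().split('\n')
--
--     def is_start(ln):
--         s = ln.strip()
--         return bool(s) and not s.startswith('#') and (
--             s.startswith(('def ', 'class ')) or 'def ' in ln or 'class ' in ln)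
--
--     start = next((i for i, ln in enumerate(lines) if is_start(ln)), None)
--     if start is None:
--         return ''
--     end = next((i for i in range(start, len(lines))
--                 if '# Expected:' in lines[i] or '# Actual:' in lines[i]), len(lines))
--     return '\n'.join(lines[start:end]).strip()
-- ===== Notes on version B (the rewrite author's own statement) =====
-- stated objective: alternative
-- what changed: Replaced A's single flag-driven loop (in_code_block state machine with early break) by two index searches - findIdx of the first def/class code line, then findIdx of the first expected/actual terminator comment after it - followed by a take/slice and join.
import Mathlib
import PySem

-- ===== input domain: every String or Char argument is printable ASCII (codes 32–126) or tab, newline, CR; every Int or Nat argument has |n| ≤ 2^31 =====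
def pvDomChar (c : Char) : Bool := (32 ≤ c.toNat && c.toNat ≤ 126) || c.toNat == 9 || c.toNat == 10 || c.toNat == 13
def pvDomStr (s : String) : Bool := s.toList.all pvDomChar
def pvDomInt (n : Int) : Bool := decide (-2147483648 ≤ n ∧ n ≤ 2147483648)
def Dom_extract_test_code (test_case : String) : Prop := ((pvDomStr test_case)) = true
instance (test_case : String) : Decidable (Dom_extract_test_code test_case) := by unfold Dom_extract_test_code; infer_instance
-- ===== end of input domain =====

-- B replaces A's flag-driven loop with two index searches (first code line, first terminator after it) plus a slice; alternative decomposition, same cost.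

-- ===== PORT A =====
-- the for-loop of A, with its 'in_code_block' flag and early break
def pvLoopA (lines : List String) (acc : List String) (inCode : Bool) : List String :=
  match lines with
  | [] => acc
  | line :: rest =>
    if !inCode && (PySem.Str.startswith (PySem.Str.strip line) "#" || PySem.Str.len (PySem.Str.strip line) == 0) then
      pvLoopA rest acc inCode
    else
      let inCode' :=
        if !inCode then
          if PySem.Str.startswith (PySem.Str.strip line) "def " || PySem.Str.startswith (PySem.Str.strip line) "class " then true
          else if PySem.Str.isIn "def " line || PySem.Str.isIn "class " line then true
          else inCode
        else inCode
      if inCode' then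
        if PySem.Str.isIn "# Expected:" line || PySem.Str.isIn "# Actual:" line then acc  -- break
        else pvLoopA rest (acc ++ [line]) inCode'
      else pvLoopA rest acc inCode'

def extract_test_code (test_case : String) : String :=
  let lines := (PySem.Str.split? (PySem.Str.strip test_case) "\n").getD []
  PySem.Str.strip (PySem.Str.join "\n" (pvLoopA lines [] false))

-- ===== PORT B =====
def pvIsStartB (ln : String) : Bool :=
  PySem.Str.len (PySem.Str.strip ln) != 0 && !PySem.Str.startswith (PySem.Str.strip ln) "#" &&
    (PySem.Str.startswith (PySem.Str.strip ln) "def " || PySem.Str.startswith (PySem.Str.strip ln) "class " ||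
      PySem.Str.isIn "def " ln || PySem.Str.isIn "class " ln)

def pvIsEndB (ln : String) : Bool :=
  PySem.Str.isIn "# Expected:" ln || PySem.Str.isIn "# Actual:" ln

def extract_test_code_alt (test_case : String) : String :=
  let lines := (PySem.Str.split? (PySem.Str.strip test_case) "\n").getD []
  match List.findIdx? pvIsStartB lines with
  | none => ""
  | some start =>
    let tail := lines.drop start
    let e := (List.findIdx? pvIsEndB tail).getD tail.length
    PySem.Str.strip (PySem.Str.join "\n" (tail.take e))

-- ===== PRECONDITION & SPEC =====
def Spec_extract_test_code (test_case : String) (out : String) : Prop := out = extract_test_code_alt test_case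
instance (test_case : String) (out : String) : Decidable (Spec_extract_test_code test_case out) := by unfold Spec_extract_test_code; infer_instance

-- ===== CLAIM (what is proved, stated in full; the proofs are below) =====
def Claim_equal_extract_test_code : Prop := ∀ (test_case : String), Dom_extract_test_code test_case → Spec_extract_test_code test_case (extract_test_code test_case)

-- ===== LEMMAS AND PROOFS =====

-- named conditions of the two programs (proof-side abbreviations, all definitional)
def pvSkip (line : String) : Bool :=
  PySem.Str.startswith (PySem.Str.strip line) "#" || PySem.Str.len (PySem.Str.strip line) == 0
def pvB1 (line : String) : Bool :=
  PySem.Str.startswith (PySem.Str.strip line) "def " || PySem.Str.startswith (PySem.Str.strip line) "class "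
def pvB2 (line : String) : Bool :=
  PySem.Str.isIn "def " line || PySem.Str.isIn "class " line

lemma pvLoopA_cons (line : String) (rest : List String) (acc : List String) (inCode : Bool) :
    pvLoopA (line :: rest) acc inCode =
      if !inCode && pvSkip line then pvLoopA rest acc inCode
      else
        let inCode' := if !inCode then
            (if pvB1 line then true else if pvB2 line then true else inCode)
          else inCode
        if inCode' then
          (if pvIsEndB line then acc else pvLoopA rest (acc ++ [line]) inCode')
        else pvLoopA rest acc inCode' := rfl

lemma pvIsStartB_eq (line : String) :
    pvIsStartB line = (!pvSkip line && (pvB1 line || pvB2 line)) := by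
  unfold pvIsStartB pvSkip pvB1 pvB2
  simp only [bne, Bool.not_or]
  ac_rfl

-- once in_code_block is set, A appends every line until a terminator: a takeWhile
lemma pvLoopA_true (l : List String) (acc : List String) :
    pvLoopA l acc true = acc ++ l.takeWhile (fun ln => !pvIsEndB ln) := by
  induction l generalizing acc with
  | nil => simp [pvLoopA]
  | cons line rest ih =>
    rw [pvLoopA_cons, List.takeWhile_cons]
    by_cases h : pvIsEndB line = true
    · simp [h]
    · simp [h, ih]

-- before in_code_block is set, A scans for the first start line
lemma pvLoopA_false (l : List String) (acc : List String) :
    pvLoopA l acc false =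
      match List.findIdx? pvIsStartB l with
      | none => acc
      | some s => acc ++ ((l.drop s).takeWhile (fun ln => !pvIsEndB ln)) := by
  induction l generalizing acc with
  | nil => simp [pvLoopA]
  | cons line rest ih =>
    rw [List.findIdx?_cons, pvLoopA_cons]
    by_cases hskip : pvSkip line = true
    · have hsf : pvIsStartB line = false := by simp [pvIsStartB_eq, hskip]
      simp only [hskip, Bool.not_false, Bool.true_and, if_true, ih, hsf, Bool.false_eq_true,
        if_neg, not_false_eq_true]
      cases List.findIdx? pvIsStartB rest <;> simp
    · have hskip' : pvSkip line = false := by simpa using hskip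
      by_cases hb : (pvB1 line || pvB2 line) = true
      · have hst : pvIsStartB line = true := by simp [pvIsStartB_eq, hskip', hb]
        have hin : (if pvB1 line then true else if pvB2 line then true else false) = true := by
          rcases Bool.or_eq_true_iff.mp hb with h | h <;> simp [h]
        simp only [hskip', Bool.not_false, Bool.true_and, Bool.false_eq_true, if_neg,
          not_false_eq_true, hin, if_true, hst, List.drop_zero, List.takeWhile_cons]
        by_cases hend : pvIsEndB line = true
        · simp [hend]
        · simp [hend, pvLoopA_true]
      · have hb' : (pvB1 line || pvB2 line) = false := by simpa using hb
        obtain ⟨h1, h2⟩ := Bool.or_eq_false_iff.mp hb'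
        have hsf : pvIsStartB line = false := by simp [pvIsStartB_eq, hb']
        have hin : (if pvB1 line then true else if pvB2 line then true else false) = false := by
          simp [h1, h2]
        simp only [hskip', Bool.not_false, Bool.true_and, Bool.false_eq_true, if_neg,
          not_false_eq_true, hin, hsf, ite_self]
        rw [ih]
        cases List.findIdx? pvIsStartB rest <;> simp

-- B's 'take up to the found terminator' is the same list as A's takeWhile
lemma pvTake_findIdx (p : String → Bool) (l : List String) :
    l.take ((List.findIdx? p l).getD l.length) = l.takeWhile (fun x => !p x) := by
  induction l with
  | nil => simp
  | cons x xs ih =>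
    rw [List.findIdx?_cons, List.takeWhile_cons]
    by_cases h : p x = true
    · simp [h]
    · have h' : p x = false := by simpa using h
      cases hf : List.findIdx? p xs with
      | none =>
          have ih' : xs.take xs.length = xs.takeWhile (fun y => !p y) := by simpa [hf] using ih
          simp [h', ih']
      | some n =>
          have ih' : xs.take n = xs.takeWhile (fun y => !p y) := by simpa [hf] using ih
          simp [h', ih']

-- ===== VERDICT (by name: the statement is the Claim_ definition above) =====
theorem extract_test_code_spec : Claim_equal_extract_test_code := by
  intro tc _
  unfold Spec_extract_test_code extract_test_code extract_test_code_alt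
  dsimp only
  generalize (PySem.Str.split? (PySem.Str.strip tc) "\n").getD [] = lines
  rw [pvLoopA_false]
  cases h : List.findIdx? pvIsStartB lines with
  | none =>
      dsimp only
      decide
  | some s =>
      dsimp only
      rw [pvTake_findIdx]
      simp
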